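-- pv_equiv track=rewrite | github.com/dongseoki/Studying-algorithms | programmers/프렌즈4블록pre.py | fallingBlocks
-- ===== SOURCE A (Python) =====
-- def fallingBlocks(m,n,sboard, visited):
--     newboard = []
--     for i in range(m):
--       newboard.append(['*'] * n)
--     for C in range(n):
--       RTop = m-1
--       for R in range(m-1, -1,-1):
--         #if sboard[R][C] != '*':
--         if visited[R][C] == False:
--           # 남아 있는 블록이라면 새로운 보드에 채워주자.
--           newboard[RTop][C] =  sboard[R][C]
--           RTop -=1
--     return newboard
-- ===== SOURCE B (Python) =====
-- def fallingBlocks(m, n, sboard, visited):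
--     cols = []
--     for C in range(n):
--         col = [sboard[R][C] for R in range(m) if not visited[R][C]]
--         cols.append(['*'] * (m - len(col)) + col)
--     return [[cols[C][R] for C in range(n)] for R in range(m)]
-- ===== Notes on version B (the rewrite author's own statement) =====
-- stated objective: simpler
-- what changed: Replaces A's in-place board mutation with a descending write-cursor (RTop) per column by a pure gather-then-place decomposition: collect each column's survivors top-to-bottom, pad with '*' on top, then assemble the rows by transposing the padded columns.
import Mathlib
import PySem

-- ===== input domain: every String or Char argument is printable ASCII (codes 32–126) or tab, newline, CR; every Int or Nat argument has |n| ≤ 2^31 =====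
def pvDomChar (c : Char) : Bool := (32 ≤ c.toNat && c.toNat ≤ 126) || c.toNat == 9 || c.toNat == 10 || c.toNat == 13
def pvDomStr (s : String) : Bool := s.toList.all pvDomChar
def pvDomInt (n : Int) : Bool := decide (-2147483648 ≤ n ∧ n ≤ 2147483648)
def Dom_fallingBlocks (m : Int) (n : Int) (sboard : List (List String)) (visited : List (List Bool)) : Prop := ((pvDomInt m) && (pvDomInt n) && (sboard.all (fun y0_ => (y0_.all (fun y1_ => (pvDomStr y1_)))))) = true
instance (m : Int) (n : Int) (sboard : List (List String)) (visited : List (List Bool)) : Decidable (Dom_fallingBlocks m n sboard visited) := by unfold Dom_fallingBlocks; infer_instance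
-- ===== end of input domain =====

-- B replaces A's in-place board mutation under a per-column RTop write cursor by a pure
-- gather-pad-transpose decomposition (objective: simpler; same O(m*n) cost).

-- shared cell accessors (visited[R][C] and sboard[R][C]; the defaults are unreachable inside Pre_)
def pvCellB (visited : List (List Bool)) (R C : Int) : Bool :=
  PySem.List.pyGetD (PySem.List.pyGetD visited R []) C true
def pvCellS (sboard : List (List String)) (R C : Int) : String :=
  PySem.List.pyGetD (PySem.List.pyGetD sboard R []) C ""

-- ===== PORT A =====
-- newboard[RTop][C] = v  (RTop and C are nonnegative and in range on every input Pre_ admits)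
def pvSet2 (nb : List (List String)) (r c : Int) (v : String) : List (List String) :=
  nb.modify r.toNat (fun row => row.set c.toNat v)

def fallingBlocks (m : Int) (n : Int) (sboard : List (List String)) (visited : List (List Bool)) : List (List String) :=
  let newboard := (PySem.List.pyRange 0 m 1).foldl (fun nb _ => nb ++ [List.replicate n.toNat "*"]) []
  (PySem.List.pyRange 0 n 1).foldl (fun nb C =>
    ((PySem.List.pyRange (m-1) (-1) (-1)).foldl
      (fun (st : List (List String) × Int) R =>
        if pvCellB visited R C == false then
          (pvSet2 st.1 st.2 C (pvCellS sboard R C), st.2 - 1)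
        else st)
      (nb, m-1)).1) newboard

-- ===== PORT B =====
-- col = [sboard[R][C] for R in range(m) if not visited[R][C]]
def pvCol (m : Int) (sboard : List (List String)) (visited : List (List Bool)) (C : Int) : List String :=
  ((PySem.List.pyRange 0 m 1).filter (fun R => !(pvCellB visited R C))).map (fun R => pvCellS sboard R C)

-- ['*'] * (m - len(col)) + col
def pvPad (m : Int) (sboard : List (List String)) (visited : List (List Bool)) (C : Int) : List String :=
  List.replicate (m - ((pvCol m sboard visited C).length : Int)).toNat "*" ++ pvCol m sboard visited C

def fallingBlocks_alt (m : Int) (n : Int) (sboard : List (List String)) (visited : List (List Bool)) : List (List String) :=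
  let cols := (PySem.List.pyRange 0 n 1).map (pvPad m sboard visited)
  (PySem.List.pyRange 0 m 1).map (fun R =>
    (PySem.List.pyRange 0 n 1).map (fun C =>
      PySem.List.pyGetD (PySem.List.pyGetD cols C []) R ""))

-- ===== PRECONDITION & SPEC =====
-- Pre_: exactly the inputs where the Python A returns (no IndexError): when its loops run
-- (m>0 and n>0), visited must have at least m rows each of length ≥ n, and sboard[R][C]
-- must exist wherever visited[R][C] is False.
def Pre_fallingBlocks (m : Int) (n : Int) (sboard : List (List String)) (visited : List (List Bool)) : Prop :=
  (0 < m ∧ 0 < n) →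
    ((decide (m ≤ (visited.length : Int)) &&
      visited.zipIdx.all (fun p =>
        !(decide ((p.2 : Int) < m)) ||
        (decide (n ≤ (p.1.length : Int)) &&
         p.1.zipIdx.all (fun q =>
           !(decide ((q.2 : Int) < n)) || q.1 ||
           (match sboard[p.2]? with
            | none => false
            | some srow => decide ((q.2 : Int) < (srow.length : Int))))))) = true)
instance (m : Int) (n : Int) (sboard : List (List String)) (visited : List (List Bool)) : Decidable (Pre_fallingBlocks m n sboard visited) := by
  unfold Pre_fallingBlocks; infer_instance

def pvWitness_fallingBlocks : Int × Int × List (List String) × List (List Bool) :=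
  (2, 2, [["a", "b"], ["c", "d"]], [[true, false], [false, false]])

def Spec_fallingBlocks (m : Int) (n : Int) (sboard : List (List String)) (visited : List (List Bool)) (out : List (List String)) : Prop := out = fallingBlocks_alt m n sboard visited
instance (m : Int) (n : Int) (sboard : List (List String)) (visited : List (List Bool)) (out : List (List String)) : Decidable (Spec_fallingBlocks m n sboard visited out) := by unfold Spec_fallingBlocks; infer_instance

-- ===== CLAIM (what is proved, stated in full; the proofs are below) =====
def Claim_equal_fallingBlocks : Prop := ∀ (m : Int) (n : Int) (sboard : List (List String)) (visited : List (List Bool)), Dom_fallingBlocks m n sboard visited → Pre_fallingBlocks m n sboard visited → Spec_fallingBlocks m n sboard visited (fallingBlocks m n sboard visited)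

-- ===== LEMMAS AND PROOFS =====

-- proof-side view of the inner loop: the sequence of writes it performs
def pvPlace : List (List String) → Int → Int → List String → List (List String)
  | nb, _, _, [] => nb
  | nb, C, t, v :: vs => pvPlace (pvSet2 nb t C v) C (t - 1) vs

-- proof-side: column c of a board
def pvColAt (c : Nat) (nb : List (List String)) : List String :=
  nb.map (fun row => row[c]?.getD "")

theorem pvInner_fold (sboard : List (List String)) (visited : List (List Bool)) (C : Int) :
    ∀ (rs : List Int) (nb : List (List String)) (t : Int),
      (rs.foldl
        (fun (st : List (List String) × Int) R =>
          if pvCellB visited R C == false then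
            (pvSet2 st.1 st.2 C (pvCellS sboard R C), st.2 - 1)
          else st)
        (nb, t))
      = (pvPlace nb C t ((rs.filter (fun R => !(pvCellB visited R C))).map (fun R => pvCellS sboard R C)),
         t - ((rs.filter (fun R => !(pvCellB visited R C))).length : Int)) := by
  intro rs
  induction rs with
  | nil => intro nb t; simp [pvPlace]
  | cons r rs ih =>
    intro nb t
    by_cases h : pvCellB visited r C = false
    · simp only [List.foldl_cons, List.filter_cons, h, Bool.not_false, if_pos, ih,
        List.map_cons, List.length_cons, pvPlace]
      simp only [beq_self_eq_true, if_true, Prod.mk.injEq]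
      exact ⟨trivial, by push_cast; ring⟩
    · have h' : pvCellB visited r C = true := by
        cases hb : pvCellB visited r C
        · exact absurd hb h
        · rfl
      simp only [List.foldl_cons, List.filter_cons, h', Bool.not_true, ih]
      simp

theorem pvSet2_map_length (nb : List (List String)) (r c : Int) (v : String) :
    (pvSet2 nb r c v).map List.length = nb.map List.length := by
  apply List.ext_getElem?
  intro i
  simp only [pvSet2, List.getElem?_map, List.getElem?_modify]
  cases h : nb[i]? with
  | none => simp
  | some row => simp only [Option.map_map, Option.map_some]; split_ifs <;> simp

theorem pvSet2_length (nb : List (List String)) (r c : Int) (v : String) :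
    (pvSet2 nb r c v).length = nb.length := by
  simp [pvSet2]

theorem pvPlace_map_length (C : Int) :
    ∀ (vs : List String) (nb : List (List String)) (t : Int),
      (pvPlace nb C t vs).map List.length = nb.map List.length := by
  intro vs
  induction vs with
  | nil => intro nb t; simp [pvPlace]
  | cons v vs ih => intro nb t; simp [pvPlace, ih, pvSet2_map_length]

theorem pvPlace_length (C : Int) (vs : List String) (nb : List (List String)) (t : Int) :
    (pvPlace nb C t vs).length = nb.length := by
  have h := congrArg List.length (pvPlace_map_length C vs nb t)
  simpa using h

theorem pvColAt_set2_ne (nb : List (List String)) (r c : Int) (v : String) (c' : Nat)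
    (hc0 : 0 ≤ c) (h : (c' : Int) ≠ c) : pvColAt c' (pvSet2 nb r c v) = pvColAt c' nb := by
  have hne : c.toNat ≠ c' := by omega
  apply List.ext_getElem?
  intro i
  simp only [pvColAt, pvSet2, List.getElem?_map, List.getElem?_modify]
  cases h : nb[i]? with
  | none => simp
  | some row =>
    simp only [Option.map_map, Option.map_some]
    split_ifs <;> simp [List.getElem?_set_ne hne]

theorem pvRow_length (nb : List (List String)) (N : Nat)
    (hrow : nb.map List.length = List.replicate nb.length N)
    (i : Nat) (row : List String) (h : nb[i]? = some row) : row.length = N := by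
  have hi : i < nb.length := by
    by_contra hi
    rw [List.getElem?_eq_none (by omega)] at h
    cases h
  have h1 : (nb.map List.length)[i]? = some row.length := by
    simp [List.getElem?_map, h]
  rw [hrow, List.getElem?_replicate, if_pos hi] at h1
  exact (Option.some.injEq _ _ ▸ h1).symm

theorem pvColAt_set2_self (nb : List (List String)) (r : Int) (v : String) (c' : Nat) (N : Nat)
    (hc : c' < N) (hrow : nb.map List.length = List.replicate nb.length N) :
    pvColAt c' (pvSet2 nb r (c' : Int) v) = (pvColAt c' nb).set r.toNat v := by
  apply List.ext_getElem?
  intro i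
  simp only [pvColAt, pvSet2, Int.toNat_natCast, List.getElem?_map, List.getElem?_modify,
    List.getElem?_set]
  cases h : nb[i]? with
  | none =>
    have hlen : nb.length ≤ i := by
      have := List.getElem?_eq_none_iff.mp h
      simpa using this
    simp only [Option.map_none]
    split_ifs with h1 h2
    · simp at h2; omega
    · rfl
    · rfl
  | some row =>
    have hi : i < nb.length := by
      by_contra hi
      rw [List.getElem?_eq_none (by omega)] at h
      cases h
    have hN := pvRow_length nb N hrow i row h
    simp only [Option.map_map, Option.map_some]
    split_ifs with h1 h2
    · simp [List.getElem?_set_self (by omega : c' < row.length)]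
    · simp [List.length_map] at h2; omega
    · rfl

theorem pvPlace_colAt_ne (C : Int) (c' : Nat) (hC : 0 ≤ C) (h : (c' : Int) ≠ C) :
    ∀ (vs : List String) (nb : List (List String)) (t : Int),
      pvColAt c' (pvPlace nb C t vs) = pvColAt c' nb := by
  intro vs
  induction vs with
  | nil => intro nb t; simp [pvPlace]
  | cons v vs ih => intro nb t; simp [pvPlace, ih, pvColAt_set2_ne _ _ _ _ _ hC h]

theorem pvColAt_length (c' : Nat) (nb : List (List String)) :
    (pvColAt c' nb).length = nb.length := by
  simp [pvColAt]

theorem pvPlace_colAt_self (c' : Nat) (N : Nat) (hc : c' < N) :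
    ∀ (vs : List String) (nb : List (List String)) (t : Int),
      nb.map List.length = List.replicate nb.length N →
      (vs.length : Int) ≤ t + 1 → t < (nb.length : Int) →
      pvColAt c' (pvPlace nb (c' : Int) t vs)
        = (pvColAt c' nb).take (t + 1 - vs.length).toNat ++ vs.reverse
            ++ (pvColAt c' nb).drop (t + 1).toNat := by
  intro vs
  induction vs with
  | nil =>
    intro nb t hrow hv ht
    simp only [pvPlace, List.length_nil, List.reverse_nil, List.append_nil,
      Nat.cast_zero, Int.sub_zero]
    rw [List.take_append_drop]
  | cons v vs ih =>
    intro nb t hrow hv ht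
    have ht0 : 0 ≤ t := by
      have : (0:Int) ≤ vs.length := by positivity
      simp only [List.length_cons] at hv
      push_cast at hv
      omega
    have hrow' : (pvSet2 nb t (c':Int) v).map List.length
        = List.replicate (pvSet2 nb t (c':Int) v).length N := by
      rw [pvSet2_map_length, pvSet2_length, hrow]
    have hlen2 : (pvSet2 nb t (c':Int) v).length = nb.length := pvSet2_length _ _ _ _
    have hv' : (vs.length : Int) ≤ (t - 1) + 1 := by
      simp only [List.length_cons] at hv; push_cast at hv; omega
    have ht' : t - 1 < ((pvSet2 nb t (c':Int) v).length : Int) := by rw [hlen2]; omega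
    rw [pvPlace, ih _ _ hrow' hv' ht']
    rw [pvColAt_set2_self nb t v c' N hc hrow]
    have httoNat : t.toNat < (pvColAt c' nb).length := by
      rw [pvColAt_length]; omega
    -- rewrite set as take/cons/drop
    rw [List.set_eq_take_append_cons_drop]
    rw [if_pos httoNat]
    have hL : ((pvColAt c' nb).take t.toNat).length = t.toNat := by
      simp [List.length_take]; omega
    simp only [List.length_cons] at hv
    -- lengths for take/drop over the append
    rw [List.take_append, List.drop_append]
    have e1 : ((t - 1) + 1 - (vs.length:Int)).toNat = (t + 1 - ((vs.length:Int)+1)).toNat := by omega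
    have e2 : ((t - 1) + 1 - (vs.length:Int)).toNat ≤ t.toNat := by omega
    rw [List.take_take]
    have e3 : min ((t - 1) + 1 - (vs.length:Int)).toNat t.toNat = (t + 1 - ((vs.length:Int)+1)).toNat := by omega
    rw [hL]
    have e4 : ((t - 1) + 1 - (vs.length:Int)).toNat - t.toNat = 0 := by omega
    have e5 : ((t-1) + 1).toNat - t.toNat = 0 := by omega
    have e6 : ((t-1) + 1).toNat = t.toNat := by omega
    have e7 : (t + 1).toNat = t.toNat + 1 := by omega
    rw [e3, e4, e5, e6]
    push_cast
    simp [e7, List.append_assoc]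

theorem pvFoldAppend (x : List String) :
    ∀ (l : List Int) (init : List (List String)),
      l.foldl (fun nb _ => nb ++ [x]) init = init ++ List.replicate l.length x := by
  intro l
  induction l with
  | nil => intro init; simp
  | cons a l ih =>
    intro init
    rw [List.foldl_cons, ih, List.append_assoc, List.length_cons]
    simp [List.replicate_succ]

theorem pvRange_toNat (n : Int) : PySem.List.pyRange 0 n = PySem.List.pyRange 0 (n.toNat : Int) := by
  rw [PySem.List.pyRange_one, PySem.List.pyRange_one]
  have h : (n - 0).toNat = ((n.toNat : Int) - 0).toNat := by omega
  rw [h]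

theorem pvStep_eq (m : Int) (sboard : List (List String)) (visited : List (List Bool))
    (nb : List (List String)) (C : Int) :
    ((PySem.List.pyRange (m-1) (-1) (-1)).foldl
      (fun (st : List (List String) × Int) R =>
        if pvCellB visited R C == false then
          (pvSet2 st.1 st.2 C (pvCellS sboard R C), st.2 - 1)
        else st)
      (nb, m-1)).1
    = pvPlace nb C (m-1) (pvCol m sboard visited C).reverse := by
  rw [pvInner_fold]
  have h1 : PySem.List.pyRange (m-1) (-1) (-1) = (PySem.List.pyRange 0 m).reverse := by
    rw [PySem.List.pyRange_neg_one_eq_reverse]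
    norm_num
  simp only [h1, List.filter_reverse, List.map_reverse, pvCol]

theorem pvCol_len_le (m : Int) (sboard : List (List String)) (visited : List (List Bool)) (C : Int) :
    (pvCol m sboard visited C).length ≤ m.toNat := by
  have h := List.length_filter_le (fun R => !(pvCellB visited R C)) (PySem.List.pyRange 0 m)
  simp only [pvCol, List.length_map]
  calc _ ≤ (PySem.List.pyRange 0 m).length := h
    _ = m.toNat := by rw [PySem.List.length_pyRange_one]; omega

theorem pvAboard (m n : Int) (sboard : List (List String)) (visited : List (List Bool))
    (hm : 0 < m) :
    ∀ (c : Nat), c ≤ n.toNat →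
      (((PySem.List.pyRange 0 (c : Int)).foldl
        (fun nb C => ((PySem.List.pyRange (m-1) (-1) (-1)).foldl
          (fun (st : List (List String) × Int) R =>
            if pvCellB visited R C == false then
              (pvSet2 st.1 st.2 C (pvCellS sboard R C), st.2 - 1)
            else st)
          (nb, m-1)).1)
        (List.replicate m.toNat (List.replicate n.toNat "*"))).map List.length
          = List.replicate m.toNat n.toNat) ∧
      (((PySem.List.pyRange 0 (c : Int)).foldl
        (fun nb C => ((PySem.List.pyRange (m-1) (-1) (-1)).foldl
          (fun (st : List (List String) × Int) R =>
            if pvCellB visited R C == false then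
              (pvSet2 st.1 st.2 C (pvCellS sboard R C), st.2 - 1)
            else st)
          (nb, m-1)).1)
        (List.replicate m.toNat (List.replicate n.toNat "*"))).length = m.toNat) ∧
      (∀ c' : Nat, c' < n.toNat →
        pvColAt c' ((PySem.List.pyRange 0 (c : Int)).foldl
          (fun nb C => ((PySem.List.pyRange (m-1) (-1) (-1)).foldl
            (fun (st : List (List String) × Int) R =>
              if pvCellB visited R C == false then
                (pvSet2 st.1 st.2 C (pvCellS sboard R C), st.2 - 1)
              else st)
            (nb, m-1)).1)
          (List.replicate m.toNat (List.replicate n.toNat "*")))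
        = if c' < c then pvPad m sboard visited (c' : Int) else List.replicate m.toNat "*") := by
  intro c
  induction c with
  | zero =>
    intro _
    refine ⟨by simp, by simp, ?_⟩
    intro c' hc'
    simp [pvColAt, List.map_replicate, hc']
  | succ c ih =>
    intro hc1
    obtain ⟨ihrow, ihlen, ihcol⟩ := ih (by omega)
    have hcast : ((c + 1 : Nat) : Int) = (c : Int) + 1 := by push_cast; ring
    rw [hcast, PySem.List.pyRange_one_succ_right (by positivity), List.foldl_append,
      List.foldl_cons, List.foldl_nil]
    rw [pvStep_eq]
    set old := (PySem.List.pyRange 0 (c : Int)).foldl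
          (fun nb C => ((PySem.List.pyRange (m-1) (-1) (-1)).foldl
            (fun (st : List (List String) × Int) R =>
              if pvCellB visited R C == false then
                (pvSet2 st.1 st.2 C (pvCellS sboard R C), st.2 - 1)
              else st)
            (nb, m-1)).1)
          (List.replicate m.toNat (List.replicate n.toNat "*")) with hold
    refine ⟨?_, ?_, ?_⟩
    · rw [pvPlace_map_length, ihrow]
    · rw [pvPlace_length, ihlen]
    · intro c' hc'
      by_cases hcc : c' = c
      · subst hcc
        have hrow : old.map List.length = List.replicate old.length n.toNat := by
          rw [ihrow, ihlen]
        have hlenvs : (((pvCol m sboard visited (c' : Int)).reverse.length : Nat) : Int) ≤ (m - 1) + 1 := by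
          have h := pvCol_len_le m sboard visited (c' : Int)
          rw [List.length_reverse]
          omega
        have hts : (m - 1) < (old.length : Int) := by rw [ihlen]; omega
        rw [pvPlace_colAt_self c' n.toNat hc' _ _ _ hrow hlenvs hts]
        rw [ihcol c' hc', if_neg (by omega)]
        have hm1 : (m - 1) + 1 = m := by ring
        rw [hm1, List.reverse_reverse, List.drop_replicate, List.take_replicate]
        have klen : (pvCol m sboard visited (c' : Int)).length ≤ m.toNat :=
          pvCol_len_le m sboard visited (c' : Int)
        have e1 : m.toNat - m.toNat = 0 := by omega
        have e2 : min ((m - ((pvCol m sboard visited (c' : Int)).reverse.length : Int)).toNat) m.toNat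
            = (m - ((pvCol m sboard visited (c' : Int)).length : Int)).toNat := by
          rw [List.length_reverse]; omega
        rw [e1, e2]
        simp [pvPad]
      · have hne : ((c' : Int)) ≠ ((c : Int)) := by exact_mod_cast hcc
        rw [pvPlace_colAt_ne (c : Int) c' (by positivity) hne, ihcol c' hc']
        by_cases hlt : c' < c
        · rw [if_pos hlt, if_pos (by omega)]
        · rw [if_neg hlt, if_neg (by omega)]

-- ===== VERDICT (by name: the statement is the Claim_ definition above) =====
theorem fallingBlocks_spec : Claim_equal_fallingBlocks := by
  intro m n sboard visited _ _
  unfold Spec_fallingBlocks fallingBlocks fallingBlocks_alt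
  rw [pvFoldAppend]
  simp only [List.nil_append, PySem.List.length_pyRange_one, Int.sub_zero]
  by_cases hm : m ≤ 0
  · -- m ≤ 0: both sides are []
    have hm0 : m.toNat = 0 := by omega
    have hB : PySem.List.pyRange 0 m = ([] : List Int) := PySem.List.pyRange_one_eq_nil (by omega)
    rw [hm0, hB, List.replicate_zero, List.map_nil]
    have hstepnil : ∀ C : Int,
        ((PySem.List.pyRange (m-1) (-1) (-1)).foldl
          (fun (st : List (List String) × Int) R =>
            if pvCellB visited R C == false then
              (pvSet2 st.1 st.2 C (pvCellS sboard R C), st.2 - 1)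
            else st)
          (([] : List (List String)), m-1)).1 = [] := by
      intro C
      rw [pvStep_eq]
      have h := pvPlace_length C ((pvCol m sboard visited C).reverse) [] (m-1)
      exact List.eq_nil_of_length_eq_zero (by simpa using h)
    have hfold : ∀ l : List Int,
        l.foldl (fun nb C => ((PySem.List.pyRange (m-1) (-1) (-1)).foldl
          (fun (st : List (List String) × Int) R =>
            if pvCellB visited R C == false then
              (pvSet2 st.1 st.2 C (pvCellS sboard R C), st.2 - 1)
            else st)
          (nb, m-1)).1) [] = [] := by
      intro l
      induction l with
      | nil => rfl
      | cons a l ih => rw [List.foldl_cons, hstepnil a, ih]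
    rw [hfold]
  · -- 0 < m
    rw [pvRange_toNat n]
    obtain ⟨hrowlen, hlen, hcols⟩ := pvAboard m n sboard visited (by omega) n.toNat le_rfl
    apply List.ext_getElem
    · rw [hlen]
      simp [PySem.List.length_pyRange_one]
      try omega
    intro i h1 h2
    have hi : i < m.toNat := by rwa [hlen] at h1
    have hArow : ∀ row, (((PySem.List.pyRange 0 ((n.toNat : Nat) : Int)).foldl
        (fun nb C => ((PySem.List.pyRange (m-1) (-1) (-1)).foldl
          (fun (st : List (List String) × Int) R =>
            if pvCellB visited R C == false then
              (pvSet2 st.1 st.2 C (pvCellS sboard R C), st.2 - 1)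
            else st)
          (nb, m-1)).1)
        (List.replicate m.toNat (List.replicate n.toNat "*")))[i]'h1) = row → row.length = n.toNat := by
      intro row hrow
      have h := congrArg (fun l => l[i]?) hrowlen
      simp only [List.getElem?_map, List.getElem?_replicate, hi, if_pos] at h
      rw [List.getElem?_eq_getElem h1, hrow] at h
      simpa using h
    rw [List.getElem_map]
    rw [PySem.List.getElem_pyRange_one]
    simp only [Int.zero_add]
    apply List.ext_getElem
    · rw [hArow _ rfl]
      simp [PySem.List.length_pyRange_one]
      try omega
    intro j hj1 hj2
    have hj : j < n.toNat := by rw [hArow _ rfl] at hj1; exact hj1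
    rw [List.getElem_map]
    rw [PySem.List.getElem_pyRange_one]
    simp only [Int.zero_add]
    rw [PySem.List.pyGetD_map_pyRange (pvPad m sboard visited) n.toNat j [] hj]
    rw [PySem.List.pyGetD_of_nonneg _ _ (by positivity)]
    have hplen : (pvPad m sboard visited (j : Int)).length = m.toNat := by
      have hle := pvCol_len_le m sboard visited (j : Int)
      simp only [pvPad, List.length_append, List.length_replicate]
      omega
    have hiplen : i < (pvPad m sboard visited (j : Int)).length := by omega
    rw [Int.toNat_natCast, List.getD_eq_getElem _ _ hiplen]
    -- A side: use the column characterisation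
    have hcol := hcols j hj
    rw [if_pos hj] at hcol
    have h := congrArg (fun l => l[i]?) hcol
    simp only [pvColAt, List.getElem?_map] at h
    rw [List.getElem?_eq_getElem h1, List.getElem?_eq_getElem hiplen] at h
    simp only [Option.map_some, Option.some_inj] at h
    rw [← h]
    rw [List.getElem?_eq_getElem (by rw [hArow _ rfl]; exact hj)]
    rfl
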